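-- pv_equiv track=rewrite | github.com/arnaumoran/ECRYPT-ElGamal | ElGamal_CBC.py | decrypt_numeric_cbc
-- ===== SOURCE A (Python) =====
-- def mod_exp(base, exponent, modulus):
--     result = 1
--     base = base % modulus
--     while exponent > 0:
--         if exponent % 2 == 1:
--             result = (result * base) % modulus
--         exponent = exponent // 2
--         base = (base ** 2) % modulus
--     return result
--
-- def decrypt_numeric_cbc(ciphertext, p, x, iv):
--     decrypted_message = ''
--     previous_block = iv
--
--     for a, b in ciphertext:
--         a_inv = mod_exp(a, p-1-x, p)
--         block = (b * a_inv) % p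
--         decrypted_message += str(block ^ previous_block)
--         previous_block = b
--
--     return decrypted_message
-- ===== SOURCE B (Python) =====
-- def mod_exp(base, exponent, modulus):
--     # top-down (MSB-first) recursive square-and-multiply; no running accumulator
--     if exponent <= 0:
--         return 1
--     half = mod_exp((base * base) % modulus, exponent // 2, modulus)
--     if exponent % 2 == 1:
--         return (half * (base % modulus)) % modulus
--     return half
--
-- def decrypt_numeric_cbc(ciphertext, p, x, iv):
--     # each block's predecessor is random-accessed from the ciphertext itself and
--     # the output is built back-to-front, so no state is threaded through the pass
--     out = []
--     for i in range(len(ciphertext) - 1, -1, -1):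
--         a, b = ciphertext[i]
--         prev = iv if i == 0 else ciphertext[i - 1][1]
--         out.append(str(((b * mod_exp(a, p - 1 - x, p)) % p) ^ prev))
--     return ''.join(reversed(out))
-- ===== Notes on version B (the rewrite author's own statement) =====
-- stated objective: alternative
-- what changed: Exponentiation is a top-down MSB-first recursive square-and-multiply instead of A's LSB-first iterative accumulator loop, and the CBC pass iterates the ciphertext in reverse with the predecessor random-accessed from ciphertext[i-1] instead of threading previous_block and a growing string, joining the collected pieces reversed at the end.
import Mathlib
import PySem

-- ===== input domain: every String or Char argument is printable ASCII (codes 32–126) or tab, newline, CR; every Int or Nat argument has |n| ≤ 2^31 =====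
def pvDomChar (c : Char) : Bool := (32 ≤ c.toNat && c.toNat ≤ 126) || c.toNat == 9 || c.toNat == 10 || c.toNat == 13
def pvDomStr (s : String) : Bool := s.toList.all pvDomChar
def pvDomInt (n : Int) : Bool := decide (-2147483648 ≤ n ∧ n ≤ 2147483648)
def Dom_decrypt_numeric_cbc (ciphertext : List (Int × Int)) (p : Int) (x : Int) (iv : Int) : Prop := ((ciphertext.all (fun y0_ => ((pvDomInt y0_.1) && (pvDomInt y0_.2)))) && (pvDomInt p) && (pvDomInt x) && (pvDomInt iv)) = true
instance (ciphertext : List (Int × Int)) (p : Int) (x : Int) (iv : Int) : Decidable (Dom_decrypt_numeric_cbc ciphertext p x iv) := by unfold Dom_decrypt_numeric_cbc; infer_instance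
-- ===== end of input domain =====

-- B replaces A's LSB-first iterative square-and-multiply by a top-down MSB-first recursive one,
-- and replaces A's threaded CBC state (growing string + previous_block) by a reverse index pass
-- that random-accesses each block's predecessor from the ciphertext (objective: alternative).

-- ===== PORT A =====
def mod_exp_loop (result base exponent modulus : Int) : Int :=
  if h : exponent > 0 then
    let result' := if PySem.Int.mod exponent 2 = 1 then PySem.Int.mod (result * base) modulus else result
    mod_exp_loop result' (PySem.Int.mod (base ^ 2) modulus) (PySem.Int.floordiv exponent 2) modulus
  else result
termination_by exponent.toNat
decreasing_by
  rw [PySem.Int.floordiv_eq_ediv_of_pos (by omega)]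
  omega

def mod_exp (base exponent modulus : Int) : Int :=
  mod_exp_loop 1 (PySem.Int.mod base modulus) exponent modulus

def decrypt_numeric_cbc (ciphertext : List (Int × Int)) (p : Int) (x : Int) (iv : Int) : String :=
  (ciphertext.foldl (fun st ab =>
      let a_inv := mod_exp ab.1 (p - 1 - x) p
      let block := PySem.Int.mod (ab.2 * a_inv) p
      (st.1 ++ PySem.Int.toStr (PySem.Int.bxor block st.2), ab.2))
    ("", iv)).1

-- ===== PORT B =====
def mod_exp_msb (base exponent modulus : Int) : Int :=
  if h : exponent ≤ 0 then 1
  else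
    let half := mod_exp_msb (PySem.Int.mod (base * base) modulus) (PySem.Int.floordiv exponent 2) modulus
    if PySem.Int.mod exponent 2 = 1 then PySem.Int.mod (half * PySem.Int.mod base modulus) modulus
    else half
termination_by exponent.toNat
decreasing_by
  rw [PySem.Int.floordiv_eq_ediv_of_pos (by omega)]
  omega

-- ciphertext[i] / ciphertext[i-1]: the loop indices are always in range, so pyGetD's default is never used
def decrypt_numeric_cbc_alt (ciphertext : List (Int × Int)) (p : Int) (x : Int) (iv : Int) : String :=
  let out := (PySem.List.pyRange (PySem.List.len ciphertext - 1) (-1) (-1)).foldl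
    (fun acc i =>
      let ab := PySem.List.pyGetD ciphertext i (0, 0)
      let prev := if i = 0 then iv else (PySem.List.pyGetD ciphertext (i - 1) (0, 0)).2
      acc ++ [PySem.Int.toStr (PySem.Int.bxor (PySem.Int.mod (ab.2 * mod_exp_msb ab.1 (p - 1 - x) p) p) prev)])
    ([] : List String)
  String.join out.reverse

-- ===== PRECONDITION & SPEC =====
-- Pre_ excludes only p = 0 with a nonempty ciphertext, where Python's `%` raises ZeroDivisionError (in both A and B).
def Pre_decrypt_numeric_cbc (ciphertext : List (Int × Int)) (p : Int) (x : Int) (iv : Int) : Prop := ciphertext = [] ∨ p ≠ 0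
instance (ciphertext : List (Int × Int)) (p : Int) (x : Int) (iv : Int) : Decidable (Pre_decrypt_numeric_cbc ciphertext p x iv) := by unfold Pre_decrypt_numeric_cbc; infer_instance

def pvWitness_decrypt_numeric_cbc : (List (Int × Int)) × Int × Int × Int := ([(2, 3)], 5, 1, 7)

def Spec_decrypt_numeric_cbc (ciphertext : List (Int × Int)) (p : Int) (x : Int) (iv : Int) (out : String) : Prop := out = decrypt_numeric_cbc_alt ciphertext p x iv
instance (ciphertext : List (Int × Int)) (p : Int) (x : Int) (iv : Int) (out : String) : Decidable (Spec_decrypt_numeric_cbc ciphertext p x iv out) := by unfold Spec_decrypt_numeric_cbc; infer_instance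

-- ===== CLAIM (what is proved, stated in full; the proofs are below) =====
def Claim_equal_decrypt_numeric_cbc : Prop := ∀ (ciphertext : List (Int × Int)) (p : Int) (x : Int) (iv : Int), Dom_decrypt_numeric_cbc ciphertext p x iv → Pre_decrypt_numeric_cbc ciphertext p x iv → Spec_decrypt_numeric_cbc ciphertext p x iv (decrypt_numeric_cbc ciphertext p x iv)

-- ===== LEMMAS AND PROOFS =====

-- power congruence for Python's `%` (Int.fmod)
lemma pow_fmod (a : Int) (k : Nat) (m : Int) : ((a.fmod m) ^ k).fmod m = (a ^ k).fmod m := by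
  induction k with
  | zero => simp
  | succ n ih =>
    rw [pow_succ, pow_succ, Int.mul_fmod, ih, Int.fmod_fmod, ← Int.mul_fmod]

-- mod-mul congruence for Int.fmod, used by both exponentiation lemmas
lemma fmod_mul_congr (u u' v v' m : Int) (hu : u.fmod m = u'.fmod m)
    (hv : v.fmod m = v'.fmod m) : (u * v).fmod m = (u' * v').fmod m := by
  rw [Int.mul_fmod, hu, hv, ← Int.mul_fmod]

-- A's loop computes (result * base^exponent) mod m
lemma mod_exp_loop_eq (n : Nat) : ∀ (e r b m : Int), e.toNat = n → 0 < e →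
    mod_exp_loop r b e m = (r * b ^ n).fmod m := by
  induction n using Nat.strong_induction_on with
  | _ n ih =>
    intro e r b m hn he
    rw [mod_exp_loop]
    simp only [he, ↓reduceDIte]
    rw [PySem.Int.floordiv_eq_ediv_of_pos (by omega), show PySem.Int.mod e 2 = e % 2 from PySem.Int.mod_eq_emod_of_pos (by omega)]
    simp only [PySem.Int.mod]
    have hn1 : 1 ≤ n := by omega
    by_cases h2 : e / 2 > 0
    · have hlt : (e / 2).toNat < n := by omega
      have hhalf : (e / 2).toNat = n / 2 := by omega
      rw [ih (n / 2) (by omega) _ _ _ _ hhalf h2]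
      have hb : (((b ^ 2).fmod m) ^ (n / 2)).fmod m = ((b ^ 2) ^ (n / 2)).fmod m := pow_fmod _ _ _
      by_cases hodd : e % 2 = 1
      · have hne : n = 2 * (n / 2) + 1 := by omega
        simp only [hodd, ↓reduceIte]
        rw [fmod_mul_congr _ (r * b) _ ((b ^ 2) ^ (n / 2)) m (Int.fmod_fmod _ _) hb]
        obtain ⟨q, hq, hq2⟩ : ∃ q, n / 2 = q ∧ n = 2 * q + 1 := ⟨n / 2, rfl, hne⟩
        rw [hq, hq2]; congr 1; ring
      · have hev : e % 2 = 0 := by omega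
        have hne : n = 2 * (n / 2) := by omega
        simp only [hev]
        rw [if_neg (show ¬(0 : Int) = 1 from by norm_num)]
        rw [fmod_mul_congr _ r _ ((b ^ 2) ^ (n / 2)) m rfl hb]
        obtain ⟨q, hq, hq2⟩ : ∃ q, n / 2 = q ∧ n = 2 * q := ⟨n / 2, rfl, hne⟩
        rw [hq, hq2]; congr 1; ring
    · -- e = 1
      have he1 : e = 1 := by omega
      have hn' : n = 1 := by omega
      subst he1
      norm_num
      rw [mod_exp_loop]
      norm_num [hn']

-- B's recursion computes base^exponent mod m
lemma mod_exp_msb_eq (n : Nat) : ∀ (e b m : Int), e.toNat = n → 0 < e →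
    mod_exp_msb b e m = (b ^ n).fmod m := by
  induction n using Nat.strong_induction_on with
  | _ n ih =>
    intro e b m hn he
    rw [mod_exp_msb]
    simp only [show ¬ e ≤ 0 by omega, ↓reduceDIte]
    rw [PySem.Int.floordiv_eq_ediv_of_pos (by omega), show PySem.Int.mod e 2 = e % 2 from PySem.Int.mod_eq_emod_of_pos (by omega)]
    simp only [PySem.Int.mod]
    by_cases h2 : e / 2 > 0
    · have hlt : (e / 2).toNat < n := by omega
      have hhalf : (e / 2).toNat = n / 2 := by omega
      rw [ih (n / 2) (by omega) _ _ _ hhalf h2]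
      have hb : (((b * b).fmod m) ^ (n / 2)).fmod m = ((b * b) ^ (n / 2)).fmod m := pow_fmod _ _ _
      by_cases hodd : e % 2 = 1
      · have hne : n = 2 * (n / 2) + 1 := by omega
        simp only [hodd, ↓reduceIte]
        rw [fmod_mul_congr _ ((b * b) ^ (n / 2)) _ b m (by rw [Int.fmod_fmod]; exact hb) (Int.fmod_fmod _ _)]
        obtain ⟨q, hq, hq2⟩ : ∃ q, n / 2 = q ∧ n = 2 * q + 1 := ⟨n / 2, rfl, hne⟩
        rw [hq, hq2]; congr 1; ring
      · have hev : e % 2 = 0 := by omega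
        have hne : n = 2 * (n / 2) := by omega
        simp only [hev]
        rw [if_neg (show ¬(0 : Int) = 1 from by norm_num)]
        rw [hb]
        obtain ⟨q, hq, hq2⟩ : ∃ q, n / 2 = q ∧ n = 2 * q := ⟨n / 2, rfl, hne⟩
        rw [hq, hq2]; congr 1; ring
    · -- e = 1
      have he1 : e = 1 := by omega
      have hn' : n = 1 := by omega
      subst he1
      rw [mod_exp_msb]
      norm_num [hn', Int.mul_fmod, Int.fmod_fmod, ← Int.mul_fmod]

-- the two exponentiations agree everywhere
lemma mod_exp_eq_msb (b e m : Int) : mod_exp b e m = mod_exp_msb b e m := by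
  by_cases he : 0 < e
  · rw [mod_exp, mod_exp_loop_eq e.toNat e 1 (PySem.Int.mod b m) m rfl he,
        mod_exp_msb_eq e.toNat e b m rfl he]
    simp only [PySem.Int.mod, one_mul]
    exact pow_fmod b e.toNat m
  · rw [mod_exp, mod_exp_loop, mod_exp_msb]
    simp only [show ¬ e > 0 by omega, show e ≤ 0 by omega, ↓reduceDIte]

-- the per-block plaintext digit string, via B's exponentiation
def blockStr (p x : Int) (ab : Int × Int) (prev : Int) : String :=
  PySem.Int.toStr (PySem.Int.bxor (PySem.Int.mod (ab.2 * mod_exp_msb ab.1 (p - 1 - x) p) p) prev)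

lemma foldl_append_pull (L : List String) (u v : String) :
    List.foldl (fun r s => r ++ s) (u ++ v) L = u ++ List.foldl (fun r s => r ++ s) v L := by
  induction L generalizing v with
  | nil => rfl
  | cons h t ih => simp only [List.foldl, String.append_assoc, ih]

-- A's threaded fold, characterised as a join over blocks zipped with their predecessors
lemma cbc_loop_eq (p x : Int) (ct : List (Int × Int)) (s : String) (prev : Int) :
    (ct.foldl (fun st ab =>
        let a_inv := mod_exp ab.1 (p - 1 - x) p
        let block := PySem.Int.mod (ab.2 * a_inv) p
        (st.1 ++ PySem.Int.toStr (PySem.Int.bxor block st.2), ab.2)) (s, prev)).1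
    = s ++ String.join ((ct.zip (prev :: (ct.map Prod.snd).dropLast)).map (fun y => blockStr p x y.1 y.2)) := by
  induction ct generalizing s prev with
  | nil => simp [String.join]
  | cons hd tl ih =>
    simp only [List.foldl, List.map, List.zip_cons_cons]
    rw [ih]
    simp only [blockStr, mod_exp_eq_msb]
    cases tl with
    | nil => simp [String.join]
    | cons a b =>
      simp only [List.map, List.zip_cons_cons, String.join, List.foldl]
      simp [foldl_append_pull, String.append_assoc]

-- B's reverse index pass, characterised as the same join
lemma alt_eq_join (p x iv : Int) (ct : List (Int × Int)) :
    decrypt_numeric_cbc_alt ct p x iv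
    = String.join ((ct.zip (iv :: (ct.map Prod.snd).dropLast)).map (fun y => blockStr p x y.1 y.2)) := by
  unfold decrypt_numeric_cbc_alt
  rw [PySem.List.len_eq, PySem.List.pyRange_neg_one_eq_reverse,
      show (-1 : Int) + 1 = 0 from by norm_num,
      show ((ct.length : Int) - 1) + 1 = (ct.length : Int) from by ring]
  rw [PySem.List.foldl_append_singleton_eq_map]
  simp only [List.nil_append, List.map_reverse, List.reverse_reverse]
  congr 1
  apply List.ext_getElem
  · simp [PySem.List.length_pyRange_one]
    omega
  · intro k h1 h2
    have hk : k < ct.length := by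
      simpa [PySem.List.length_pyRange_one] using h1
    rw [List.getElem_map, List.getElem_map, PySem.List.getElem_pyRange_one]
    rw [List.getElem_zip]
    simp only [zero_add]
    have hget : PySem.List.pyGetD ct ((k : Nat) : Int) (0, 0) = ct[k] := by
      simp [PySem.List.pyGetD_natCast, List.getD_eq_getElem?_getD, hk]
    rw [hget]
    cases k with
    | zero => simp [blockStr]
    | succ j =>
      have hj : j < ct.length - 1 := by omega
      have hgetp : PySem.List.pyGetD ct (((j + 1 : Nat) : Int) - 1) (0, 0) = ct[j] := by
        rw [show (((j + 1 : Nat) : Int) - 1) = ((j : Nat) : Int) by push_cast; ring]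
        simp [PySem.List.pyGetD_natCast, List.getD_eq_getElem?_getD, show j < ct.length by omega]
      have hcast : ((j + 1 : Nat) : Int) ≠ 0 := by positivity
      simp only [hcast, ↓reduceIte, hgetp, blockStr]
      congr 2
      rw [List.getElem_cons_succ, List.getElem_dropLast, List.getElem_map]

-- ===== VERDICT (by name: the statement is the Claim_ definition above) =====
theorem decrypt_numeric_cbc_spec : Claim_equal_decrypt_numeric_cbc := by
  intro ct p x iv _ _
  unfold Spec_decrypt_numeric_cbc decrypt_numeric_cbc
  rw [alt_eq_join, cbc_loop_eq]
  simp
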